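-- pv_equiv track=rewrite | github.com/GriffRob1/Bioinformatics_Tools_Website | backend/app/algorithms/cyclopeptide_sequencer.py | linear_and_cyclo_peptide_spectrum_all_amino_acids
-- ===== SOURCE A (Python) =====
-- def linear_and_cyclo_peptide_spectrum_all_amino_acids(peptide):
--     linear_masses = [0, peptide_mass_all_amino_acids(peptide)]
--     cyclo_masses = [0, peptide_mass_all_amino_acids(peptide)]
--     length = len(peptide)
--     peptide = peptide + peptide  # makes it easier to get subpeptides that wrap around
--     for i in range(length):
--         for j in range(1, length):
--             subpeptide = peptide[i:i + j]
--             if i + j <= length: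
--                 linear_masses.append(peptide_mass_all_amino_acids(subpeptide))
--             cyclo_masses.append(peptide_mass_all_amino_acids(subpeptide))
--     linear_masses.sort()
--     cyclo_masses.sort()
--     return linear_masses, cyclo_masses
--
-- def peptide_mass_all_amino_acids(subpeptide):
--     total_mass = 0
--     for mass in subpeptide:
--         total_mass += mass
--     return total_mass
-- ===== SOURCE B (Python) =====
-- def linear_and_cyclo_peptide_spectrum_all_amino_acids(peptide):
--     n = len(peptide)
--     # prefix sums of the peptide itself (no doubling)
--     prefix = [0]
--     s = 0
--     for m in peptide:
--         s += m
--         prefix.append(s)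
--     total = prefix[n]
--     linear_masses = [0, total]
--     # every proper fragment [a:b] (length 1..n-1) in one pass over index pairs
--     for a in range(n):
--         for b in range(a + 1, n + 1):
--             if b - a < n:
--                 linear_masses.append(prefix[b] - prefix[a])
--     # cyclic windows: non-wrapping ones are exactly the proper fragments;
--     # a wrapping window is the complement of an internal fragment (1 <= a < b <= n-1)
--     cyclo_masses = list(linear_masses)
--     for b in range(2, n):
--         for a in range(1, b):
--             cyclo_masses.append(total - (prefix[b] - prefix[a]))
--     linear_masses.sort()
--     cyclo_masses.sort()
--     return linear_masses, cyclo_masses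
-- ===== Notes on version B (the rewrite author's own statement) =====
-- stated objective: faster
-- what changed: Instead of summing each subpeptide of a doubled peptide (O(n) per window), B builds prefix sums of the peptide once and enumerates index pairs: each proper fragment mass is an O(1) prefix difference, and each wrap-around cyclic window mass is total minus the mass of its complementary internal fragment, so the doubled list disappears entirely.
import Mathlib
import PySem

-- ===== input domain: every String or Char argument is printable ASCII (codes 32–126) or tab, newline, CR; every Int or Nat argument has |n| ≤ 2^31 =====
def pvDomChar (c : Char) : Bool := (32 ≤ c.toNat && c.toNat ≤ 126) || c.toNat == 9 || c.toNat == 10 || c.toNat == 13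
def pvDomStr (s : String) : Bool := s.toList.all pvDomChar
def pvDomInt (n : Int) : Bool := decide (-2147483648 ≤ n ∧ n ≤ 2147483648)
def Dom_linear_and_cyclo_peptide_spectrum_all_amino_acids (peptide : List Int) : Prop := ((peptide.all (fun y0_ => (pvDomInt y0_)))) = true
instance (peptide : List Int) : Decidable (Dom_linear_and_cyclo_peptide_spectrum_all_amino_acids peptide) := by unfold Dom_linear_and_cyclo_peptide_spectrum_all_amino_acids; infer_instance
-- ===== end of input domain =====

-- B drops A's doubled peptide and per-subpeptide summation loops: it builds prefix
-- sums once and enumerates index pairs, getting each fragment mass as an O(1)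
-- prefix difference and each wrap-around window as total minus its complementary
-- internal fragment (objective: faster).

-- ===== PORT A =====
-- helper peptide_mass_all_amino_acids: accumulating loop over the subpeptide
def pvPMass (subpeptide : List Int) : Int :=
  subpeptide.foldl (fun total_mass mass => total_mass + mass) 0

def linear_and_cyclo_peptide_spectrum_all_amino_acids (peptide : List Int) : List Int × List Int :=
  let linear_masses : List Int := [0, pvPMass peptide]
  let cyclo_masses : List Int := [0, pvPMass peptide]
  let length : Int := peptide.length
  let dbl := peptide ++ peptide
  let st := (PySem.List.pyRange 0 length 1).foldl (fun (st : List Int × List Int) i =>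
      (PySem.List.pyRange 1 length 1).foldl (fun (st : List Int × List Int) j =>
          let subpeptide := PySem.List.slice dbl (some i) (some (i + j))
          let lin := if i + j ≤ length then st.1 ++ [pvPMass subpeptide] else st.1
          (lin, st.2 ++ [pvPMass subpeptide])) st) (linear_masses, cyclo_masses)
  (PySem.List.sorted st.1 (fun x => x) false, PySem.List.sorted st.2 (fun x => x) false)

-- ===== PORT B =====
-- prefix-sum list: prefix = [0]; s = 0; for m in peptide: s += m; prefix.append(s)
def pvPrefixSums : Int → List Int → List Int
  | s, [] => [s]
  | s, m :: rest => s :: pvPrefixSums (s + m) rest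

def linear_and_cyclo_peptide_spectrum_all_amino_acids_alt (peptide : List Int) : List Int × List Int :=
  let n : Int := peptide.length
  let pre := pvPrefixSums 0 peptide
  let total := PySem.List.pyGetD pre n 0
  let linear_masses : List Int := [0, total]
  -- every proper fragment [a:b] (length 1..n-1) in one pass over index pairs
  let linear_masses := (PySem.List.pyRange 0 n 1).foldl (fun acc a =>
      (PySem.List.pyRange (a + 1) (n + 1) 1).foldl (fun acc b =>
          if b - a < n then acc ++ [PySem.List.pyGetD pre b 0 - PySem.List.pyGetD pre a 0]
          else acc) acc) linear_masses
  -- wrapping cyclic windows: complements of internal fragments (1 <= a < b <= n-1)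
  let cyclo_masses := (PySem.List.pyRange 2 n 1).foldl (fun acc b =>
      (PySem.List.pyRange 1 b 1).foldl (fun acc a =>
          acc ++ [total - (PySem.List.pyGetD pre b 0 - PySem.List.pyGetD pre a 0)]) acc) linear_masses
  (PySem.List.sorted linear_masses (fun x => x) false, PySem.List.sorted cyclo_masses (fun x => x) false)

-- ===== PRECONDITION & SPEC =====
def Spec_linear_and_cyclo_peptide_spectrum_all_amino_acids (peptide : List Int) (out : List Int × List Int) : Prop := out = linear_and_cyclo_peptide_spectrum_all_amino_acids_alt peptide
instance (peptide : List Int) (out : List Int × List Int) : Decidable (Spec_linear_and_cyclo_peptide_spectrum_all_amino_acids peptide out) := by unfold Spec_linear_and_cyclo_peptide_spectrum_all_amino_acids; infer_instance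

-- ===== CLAIM (what is proved, stated in full; the proofs are below) =====
def Claim_equal_linear_and_cyclo_peptide_spectrum_all_amino_acids : Prop := ∀ (peptide : List Int), Dom_linear_and_cyclo_peptide_spectrum_all_amino_acids peptide → Spec_linear_and_cyclo_peptide_spectrum_all_amino_acids peptide (linear_and_cyclo_peptide_spectrum_all_amino_acids peptide)

-- ===== LEMMAS AND PROOFS =====

-- prefix sum of the peptide up to (Int) index k
def pvS (p : List Int) (k : Int) : Int := (p.take k.toNat).sum

-- mass of A's window of the doubled peptide starting at i with length j
def pvMassA (p : List Int) (i j : Int) : Int :=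
  pvPMass (PySem.List.slice (p ++ p) (some i) (some (i + j)))

-- B's canonical fragment list for a left endpoint
def pvFrag (p : List Int) (a : Int) : List Int :=
  (PySem.List.pyRange (a + 1) (min ((p.length : Int) + 1) ((p.length : Int) + a)) 1).map
    (fun b => pvS p b - pvS p a)

-- B's wrap-window list for a right endpoint
def pvW (p : List Int) (b : Int) : List Int :=
  (PySem.List.pyRange 1 b 1).map (fun a => p.sum - (pvS p b - pvS p a))

-- canonical forms of A's two unsorted lists
def pvLinA (p : List Int) : List Int :=
  [0, pvPMass p] ++ (PySem.List.pyRange 0 (p.length : Int) 1).flatMap (fun i =>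
    ((PySem.List.pyRange 1 (p.length : Int) 1).filter
      (fun j => decide (i + j ≤ (p.length : Int)))).map (pvMassA p i))

def pvCycA (p : List Int) : List Int :=
  [0, pvPMass p] ++ (PySem.List.pyRange 0 (p.length : Int) 1).flatMap (fun i =>
    (PySem.List.pyRange 1 (p.length : Int) 1).map (pvMassA p i))

-- canonical forms of B's two unsorted lists
def pvLinB (p : List Int) : List Int :=
  [0, p.sum] ++ (PySem.List.pyRange 0 (p.length : Int) 1).flatMap (pvFrag p)

def pvCycB (p : List Int) : List Int :=
  pvLinB p ++ (PySem.List.pyRange 2 (p.length : Int) 1).flatMap (pvW p)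

theorem pvPMass_eq_sum (xs : List Int) : pvPMass xs = xs.sum := by
  have := PySem.List.foldl_add (l := xs) (g := fun x => x) (a := 0)
  simpa [pvPMass] using this

theorem pvPrefixSums_getD (xs : List Int) (s : Int) (k : Nat) (hk : k ≤ xs.length) :
    (pvPrefixSums s xs).getD k 0 = s + (xs.take k).sum := by
  induction xs generalizing s k with
  | nil =>
    obtain rfl : k = 0 := by simpa using hk
    simp [pvPrefixSums]
  | cons m rest ih =>
    cases k with
    | zero => simp [pvPrefixSums]
    | succ k =>
      have hk' : k ≤ rest.length := by simpa using hk
      show (pvPrefixSums s (m :: rest)).getD (k + 1) 0 = _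
      rw [pvPrefixSums, List.getD_cons_succ, ih (s + m) k hk', List.take_succ_cons,
        List.sum_cons]
      ring

theorem pvPrefixSums_pyGetD (xs : List Int) (i : Int) (h0 : 0 ≤ i) (h1 : i ≤ (xs.length : Int)) :
    PySem.List.pyGetD (pvPrefixSums 0 xs) i 0 = pvS xs i := by
  obtain ⟨n, rfl⟩ : ∃ n : Nat, i = (n : Int) := ⟨i.toNat, (Int.toNat_of_nonneg h0).symm⟩
  rw [PySem.List.pyGetD_natCast, pvPrefixSums_getD xs 0 n (by exact_mod_cast h1)]
  simp [pvS]

-- mass of a non-wrapping window of the doubled peptide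
theorem pvMass_nonwrap (p : List Int) (i j : Int) (h0 : 0 ≤ i) (h1 : 0 ≤ j)
    (h2 : i + j ≤ (p.length : Int)) :
    pvMassA p i j = pvS p (i + j) - pvS p i := by
  rw [pvMassA, pvPMass_eq_sum, PySem.List.slice_toNat _ h0 (by omega)]
  have hj : (i + j).toNat - i.toNat = j.toNat := by omega
  rw [hj, List.drop_append, List.take_append]
  have hlen : (p.drop i.toNat).length = p.length - i.toNat := by simp
  have h3 : j.toNat - (p.drop i.toNat).length = 0 := by rw [hlen]; omega
  rw [h3, List.take_zero, List.append_nil]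
  have h4 : p.take (i + j).toNat = p.take i.toNat ++ (p.drop i.toNat).take j.toNat := by
    have e : (i + j).toNat = i.toNat + j.toNat := by omega
    rw [e, List.take_add]
  unfold pvS
  rw [h4, List.sum_append]
  ring

-- mass of a wrapping window = total minus the mass of the complementary fragment
theorem pvMass_wrap (p : List Int) (i j : Int) (h0 : 0 ≤ i) (hi : i < (p.length : Int))
    (hj : j ≤ (p.length : Int)) (h : (p.length : Int) < i + j) :
    pvMassA p i j = p.sum - (pvS p i - pvS p (i - (p.length : Int) + j)) := by
  rw [pvMassA, pvPMass_eq_sum, PySem.List.slice_toNat _ h0 (by omega)]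
  have hjn : (i + j).toNat - i.toNat = j.toNat := by omega
  have h2 : i.toNat - p.length = 0 := by omega
  rw [hjn, List.drop_append, h2, List.drop_zero, List.take_append]
  have hfull : (p.drop i.toNat).take j.toNat = p.drop i.toNat :=
    List.take_of_length_le (by simp; omega)
  rw [hfull, List.sum_append]
  have harg : j.toNat - (p.drop i.toNat).length = (i - (p.length : Int) + j).toNat := by
    simp
    omega
  rw [harg]
  have hs : (p.take i.toNat).sum + (p.drop i.toNat).sum = p.sum := by
    rw [← List.sum_append, List.take_append_drop]
  unfold pvS
  linarith [hs]

-- shifting an Int range under a map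
theorem pvMap_pyRange_shift_aux (f : Int → Int) (c : Int) :
    ∀ (k : Nat) (a b : Int), (b - a).toNat = k →
      (PySem.List.pyRange a b 1).map (fun j => f (c + j))
        = (PySem.List.pyRange (c + a) (c + b) 1).map f := by
  intro k
  induction k with
  | zero =>
    intro a b hk
    rw [PySem.List.pyRange_one_eq_nil (by omega), PySem.List.pyRange_one_eq_nil (by omega)]
    rfl
  | succ k ih =>
    intro a b hk
    have hab : a < b := by omega
    rw [PySem.List.pyRange_one_cons hab,
      PySem.List.pyRange_one_cons (show c + a < c + b by omega), List.map_cons, List.map_cons]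
    congr 1
    rw [ih (a + 1) b (by omega), show c + (a + 1) = c + a + 1 from by ring]

theorem pvMap_pyRange_shift (f : Int → Int) (c a b : Int) :
    (PySem.List.pyRange a b 1).map (fun j => f (c + j))
      = (PySem.List.pyRange (c + a) (c + b) 1).map f :=
  pvMap_pyRange_shift_aux f c (b - a).toNat a b rfl

-- filtering an Int range by an upper bound keeps a prefix
theorem pvFilter_pyRange_lt_aux (t : Int) :
    ∀ (k : Nat) (a b : Int), (b - a).toNat = k →
      (PySem.List.pyRange a b 1).filter (fun j => decide (j < t))
        = PySem.List.pyRange a (min b t) 1 := by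
  intro k
  induction k with
  | zero =>
    intro a b hk
    rw [PySem.List.pyRange_one_eq_nil (by omega), PySem.List.pyRange_one_eq_nil (by omega)]
    rfl
  | succ k ih =>
    intro a b hk
    have hab : a < b := by omega
    rw [PySem.List.pyRange_one_cons hab, List.filter_cons]
    by_cases hat : a < t
    · rw [if_pos (by simpa using hat)]
      rw [ih (a + 1) b (by omega), ← PySem.List.pyRange_one_cons (by omega : a < min b t)]
    · rw [if_neg (by simpa using hat)]
      rw [ih (a + 1) b (by omega), PySem.List.pyRange_one_eq_nil (by omega),
        PySem.List.pyRange_one_eq_nil (by omega)]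

theorem pvFilter_pyRange_lt (a b t : Int) :
    (PySem.List.pyRange a b 1).filter (fun j => decide (j < t))
      = PySem.List.pyRange a (min b t) 1 :=
  pvFilter_pyRange_lt_aux t (b - a).toNat a b rfl

-- interleaved flatMap is a permutation of the two separate flatMaps
theorem pvFlatMap_append_perm {α β : Type} (l : List α) (f g : α → List β) :
    (l.flatMap (fun x => f x ++ g x)).Perm (l.flatMap f ++ l.flatMap g) := by
  induction l with
  | nil => simp
  | cons x l ih =>
    simp only [List.flatMap_cons, List.append_assoc]
    exact List.Perm.append_left (f x)
      ((List.Perm.append_left (g x) ih).trans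
        (List.perm_append_comm_assoc (g x) (l.flatMap f) (l.flatMap g)))

-- A's non-wrapping windows at a fixed start are exactly B's fragments there
theorem pvNW_eq (p : List Int) (i : Int) (h0 : 0 ≤ i) :
    (PySem.List.pyRange 1 (min ((p.length : Int)) ((p.length : Int) - i + 1)) 1).map (pvMassA p i)
      = pvFrag p i := by
  rw [List.map_congr_left (g := fun j => pvS p (i + j) - pvS p i) ?hmap]
  case hmap =>
    intro j hj
    rw [PySem.List.mem_pyRange_one] at hj
    exact pvMass_nonwrap p i j h0 (by omega) (by omega)
  have hs := pvMap_pyRange_shift (fun b => pvS p b - pvS p i) i 1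
    (min ((p.length : Int)) ((p.length : Int) - i + 1))
  simp only [] at hs
  rw [hs]
  unfold pvFrag
  rw [show i + min ((p.length : Int)) ((p.length : Int) - i + 1)
      = min ((p.length : Int) + 1) ((p.length : Int) + i) from by omega]

-- A's inner linear list (filter form) equals B's fragment list
theorem pvFragA (p : List Int) (i : Int) (h0 : 0 ≤ i) :
    ((PySem.List.pyRange 1 (p.length : Int) 1).filter
        (fun j => decide (i + j ≤ (p.length : Int)))).map (pvMassA p i)
      = pvFrag p i := by
  rw [List.filter_congr (q := fun j => decide (j < (p.length : Int) - i + 1))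
      (fun j _ => by simp only [decide_eq_decide]; omega),
    pvFilter_pyRange_lt]
  exact pvNW_eq p i h0

-- A's wrapping windows at a fixed start are B's complement windows there
theorem pvW_eq (p : List Int) (i : Int) (h0 : 0 ≤ i) (h1 : i < (p.length : Int)) :
    (PySem.List.pyRange (min ((p.length : Int)) ((p.length : Int) - i + 1)) (p.length : Int)
        1).map (pvMassA p i)
      = pvW p i := by
  by_cases h2 : 2 ≤ i
  · rw [show min ((p.length : Int)) ((p.length : Int) - i + 1) = (p.length : Int) - i + 1
        from by omega]
    rw [List.map_congr_left (g := fun j => p.sum - (pvS p i - pvS p (i - (p.length : Int) + j)))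
        ?hmapw]
    case hmapw =>
      intro j hj
      rw [PySem.List.mem_pyRange_one] at hj
      exact pvMass_wrap p i j h0 h1 (by omega) (by omega)
    have hs := pvMap_pyRange_shift (fun a => p.sum - (pvS p i - pvS p a))
      (i - (p.length : Int)) ((p.length : Int) - i + 1) (p.length : Int)
    simp only [] at hs
    rw [hs, show i - (p.length : Int) + ((p.length : Int) - i + 1) = 1 from by ring,
      show i - (p.length : Int) + (p.length : Int) = i from by ring]
    rfl
  · rw [PySem.List.pyRange_one_eq_nil (by omega)]
    unfold pvW
    rw [PySem.List.pyRange_one_eq_nil (by omega)]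
    rfl

-- A's port computes the sorted canonical lists
theorem pvA_split (p : List Int) :
    linear_and_cyclo_peptide_spectrum_all_amino_acids p
      = (PySem.List.sorted (pvLinA p) (fun x => x) false,
         PySem.List.sorted (pvCycA p) (fun x => x) false) := by
  unfold linear_and_cyclo_peptide_spectrum_all_amino_acids
  simp only []
  have hinner : ∀ (st : List Int × List Int) (i : Int),
      (PySem.List.pyRange 1 (p.length : Int) 1).foldl (fun (st : List Int × List Int) j =>
        (if i + j ≤ (p.length : Int) then
            st.1 ++ [pvPMass (PySem.List.slice (p ++ p) (some i) (some (i + j)))]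
          else st.1,
         st.2 ++ [pvPMass (PySem.List.slice (p ++ p) (some i) (some (i + j)))])) st
      = (st.1 ++ ((PySem.List.pyRange 1 (p.length : Int) 1).filter
            (fun j => decide (i + j ≤ (p.length : Int)))).map (pvMassA p i),
         st.2 ++ (PySem.List.pyRange 1 (p.length : Int) 1).map (pvMassA p i)) := by
    intro st i
    rw [PySem.List.foldl_prod_mk
        (f := fun acc j => if i + j ≤ (p.length : Int) then
            acc ++ [pvPMass (PySem.List.slice (p ++ p) (some i) (some (i + j)))] else acc)
        (g := fun acc j =>
            acc ++ [pvPMass (PySem.List.slice (p ++ p) (some i) (some (i + j)))]),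
      PySem.List.foldl_append_ite (p := fun j => i + j ≤ (p.length : Int))
        (f := fun j => pvPMass (PySem.List.slice (p ++ p) (some i) (some (i + j)))),
      PySem.List.foldl_append_singleton_eq_map]
    rfl
  have houter :
      List.foldl (fun (st : List Int × List Int) i =>
          List.foldl (fun (st : List Int × List Int) j =>
              (if i + j ≤ (p.length : Int) then
                  st.1 ++ [pvPMass (PySem.List.slice (p ++ p) (some i) (some (i + j)))]
                else st.1,
               st.2 ++ [pvPMass (PySem.List.slice (p ++ p) (some i) (some (i + j)))]))
            st (PySem.List.pyRange 1 (p.length : Int) 1))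
        ([0, pvPMass p], [0, pvPMass p]) (PySem.List.pyRange 0 (p.length : Int) 1)
      = List.foldl (fun (st : List Int × List Int) i =>
          (st.1 ++ ((PySem.List.pyRange 1 (p.length : Int) 1).filter
              (fun j => decide (i + j ≤ (p.length : Int)))).map (pvMassA p i),
           st.2 ++ (PySem.List.pyRange 1 (p.length : Int) 1).map (pvMassA p i)))
        ([0, pvPMass p], [0, pvPMass p]) (PySem.List.pyRange 0 (p.length : Int) 1) :=
    PySem.List.foldl_congr_mem _ _ _ _ (fun st i _ => hinner st i)
  rw [houter,
    PySem.List.foldl_prod_mk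
      (f := fun acc i => acc ++ ((PySem.List.pyRange 1 (p.length : Int) 1).filter
          (fun j => decide (i + j ≤ (p.length : Int)))).map (pvMassA p i))
      (g := fun acc i => acc ++ (PySem.List.pyRange 1 (p.length : Int) 1).map (pvMassA p i)),
    PySem.List.foldl_append_eq_flatMap, PySem.List.foldl_append_eq_flatMap]
  rfl

-- B's port computes the sorted canonical lists
theorem pvB_split (p : List Int) :
    linear_and_cyclo_peptide_spectrum_all_amino_acids_alt p
      = (PySem.List.sorted (pvLinB p) (fun x => x) false,
         PySem.List.sorted (pvCycB p) (fun x => x) false) := by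
  unfold linear_and_cyclo_peptide_spectrum_all_amino_acids_alt
  simp only []
  have hT : PySem.List.pyGetD (pvPrefixSums 0 p) ((p.length : Int)) 0 = p.sum := by
    rw [pvPrefixSums_pyGetD p _ (Int.natCast_nonneg _) le_rfl]
    simp [pvS]
  rw [hT]
  have hinL : ∀ (acc : List Int), ∀ a ∈ PySem.List.pyRange 0 (p.length : Int) 1,
      List.foldl (fun (acc : List Int) b =>
          if b - a < (p.length : Int) then
            acc ++ [PySem.List.pyGetD (pvPrefixSums 0 p) b 0
              - PySem.List.pyGetD (pvPrefixSums 0 p) a 0]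
          else acc) acc (PySem.List.pyRange (a + 1) ((p.length : Int) + 1) 1)
      = acc ++ pvFrag p a := by
    intro acc a ha
    rw [PySem.List.mem_pyRange_one] at ha
    rw [PySem.List.foldl_append_ite (p := fun b => b - a < (p.length : Int))
        (f := fun b => PySem.List.pyGetD (pvPrefixSums 0 p) b 0
          - PySem.List.pyGetD (pvPrefixSums 0 p) a 0)]
    congr 1
    rw [List.filter_congr (q := fun b => decide (b < (p.length : Int) + a))
        (fun b _ => by simp only [decide_eq_decide]; omega),
      pvFilter_pyRange_lt]
    unfold pvFrag
    refine List.map_congr_left ?_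
    intro b hb
    rw [PySem.List.mem_pyRange_one] at hb
    rw [pvPrefixSums_pyGetD p b (by omega) (by omega),
      pvPrefixSums_pyGetD p a (by omega) (by omega)]
  have houtL :
      List.foldl (fun (acc : List Int) a =>
          List.foldl (fun (acc : List Int) b =>
              if b - a < (p.length : Int) then
                acc ++ [PySem.List.pyGetD (pvPrefixSums 0 p) b 0
                  - PySem.List.pyGetD (pvPrefixSums 0 p) a 0]
              else acc) acc (PySem.List.pyRange (a + 1) ((p.length : Int) + 1) 1))
        [0, p.sum] (PySem.List.pyRange 0 (p.length : Int) 1)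
      = List.foldl (fun (acc : List Int) a => acc ++ pvFrag p a)
        [0, p.sum] (PySem.List.pyRange 0 (p.length : Int) 1) :=
    PySem.List.foldl_congr_mem _ _ _ _ hinL
  rw [houtL, PySem.List.foldl_append_eq_flatMap]
  have hinC : ∀ (acc : List Int), ∀ b ∈ PySem.List.pyRange 2 (p.length : Int) 1,
      List.foldl (fun (acc : List Int) a =>
          acc ++ [p.sum - (PySem.List.pyGetD (pvPrefixSums 0 p) b 0
            - PySem.List.pyGetD (pvPrefixSums 0 p) a 0)]) acc (PySem.List.pyRange 1 b 1)
      = acc ++ pvW p b := by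
    intro acc b hb
    rw [PySem.List.mem_pyRange_one] at hb
    rw [PySem.List.foldl_append_singleton_eq_map]
    congr 1
    unfold pvW
    refine List.map_congr_left ?_
    intro a ha
    rw [PySem.List.mem_pyRange_one] at ha
    rw [pvPrefixSums_pyGetD p b (by omega) (by omega),
      pvPrefixSums_pyGetD p a (by omega) (by omega)]
  have houtC :
      List.foldl (fun (acc : List Int) b =>
          List.foldl (fun (acc : List Int) a =>
              acc ++ [p.sum - (PySem.List.pyGetD (pvPrefixSums 0 p) b 0
                - PySem.List.pyGetD (pvPrefixSums 0 p) a 0)]) acc (PySem.List.pyRange 1 b 1))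
        ([0, p.sum] ++ List.flatMap (pvFrag p) (PySem.List.pyRange 0 (p.length : Int) 1))
        (PySem.List.pyRange 2 (p.length : Int) 1)
      = List.foldl (fun (acc : List Int) b => acc ++ pvW p b)
        ([0, p.sum] ++ List.flatMap (pvFrag p) (PySem.List.pyRange 0 (p.length : Int) 1))
        (PySem.List.pyRange 2 (p.length : Int) 1) :=
    PySem.List.foldl_congr_mem _ _ _ _ hinC
  rw [houtC, PySem.List.foldl_append_eq_flatMap]
  rfl

-- the unsorted linear lists coincide
theorem pvLin_eq (p : List Int) : pvLinA p = pvLinB p := by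
  unfold pvLinA pvLinB
  rw [pvPMass_eq_sum]
  congr 1
  refine List.flatMap_congr (fun i hi => ?_)
  rw [PySem.List.mem_pyRange_one] at hi
  exact pvFragA p i hi.1

-- the wrap flatMap over [0,n) is the wrap flatMap over [2,n)
theorem pvW_flatMap (p : List Int) :
    (PySem.List.pyRange 0 (p.length : Int) 1).flatMap (pvW p)
      = (PySem.List.pyRange 2 (p.length : Int) 1).flatMap (pvW p) := by
  have w0 : pvW p 0 = [] := by
    unfold pvW; rw [PySem.List.pyRange_one_eq_nil (by omega)]; rfl
  have w1 : pvW p 1 = [] := by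
    unfold pvW; rw [PySem.List.pyRange_one_eq_nil (by omega)]; rfl
  by_cases h2 : 2 ≤ (p.length : Int)
  · rw [PySem.List.pyRange_one_cons (show (0 : Int) < (p.length : Int) by omega),
      show (0 : Int) + 1 = 1 from by norm_num,
      PySem.List.pyRange_one_cons (show (1 : Int) < (p.length : Int) by omega),
      show (1 : Int) + 1 = 2 from by norm_num,
      List.flatMap_cons, List.flatMap_cons, w0, w1]
    rfl
  · rcases (by omega : (p.length : Int) ≤ 0 ∨ (p.length : Int) = 1) with h | h
    · rw [PySem.List.pyRange_one_eq_nil h, PySem.List.pyRange_one_eq_nil (by omega)]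
    · rw [h, PySem.List.pyRange_one_cons (by norm_num : (0 : Int) < 1),
        show (0 : Int) + 1 = 1 from by norm_num,
        PySem.List.pyRange_one_eq_nil (by norm_num : (1 : Int) ≤ 1),
        PySem.List.pyRange_one_eq_nil (by norm_num : (1 : Int) ≤ 2),
        List.flatMap_cons, w0]
      rfl

-- the unsorted cyclic lists are permutations of each other
theorem pvCyc_perm (p : List Int) : (pvCycA p).Perm (pvCycB p) := by
  unfold pvCycA pvCycB pvLinB
  rw [pvPMass_eq_sum]
  have hsplit : ∀ i ∈ PySem.List.pyRange 0 (p.length : Int) 1,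
      (PySem.List.pyRange 1 (p.length : Int) 1).map (pvMassA p i) = pvFrag p i ++ pvW p i := by
    intro i hi
    rw [PySem.List.mem_pyRange_one] at hi
    rw [PySem.List.pyRange_one_append 1 (min ((p.length : Int)) ((p.length : Int) - i + 1))
        (p.length : Int) (by omega) (by omega), List.map_append,
      pvNW_eq p i hi.1, pvW_eq p i hi.1 hi.2]
  rw [List.flatMap_congr hsplit]
  refine List.Perm.trans (List.Perm.append_left _ (pvFlatMap_append_perm _ (pvFrag p) (pvW p))) ?_
  rw [pvW_flatMap, List.append_assoc]

-- ===== VERDICT (by name: the statement is the Claim_ definition above) =====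
theorem linear_and_cyclo_peptide_spectrum_all_amino_acids_spec : Claim_equal_linear_and_cyclo_peptide_spectrum_all_amino_acids := by
  intro p _
  show linear_and_cyclo_peptide_spectrum_all_amino_acids p
      = linear_and_cyclo_peptide_spectrum_all_amino_acids_alt p
  rw [pvA_split, pvB_split, pvLin_eq p,
    PySem.List.sorted_eq_sorted_of_perm (pvCycA p) (pvCycB p) (fun x => x)
      (fun _ _ h => h) (pvCyc_perm p)]
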